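-- pv_equiv track=rewrite | github.com/LucianP0220/cs351-programmingLanguages | HW2-python practice.py | cate_letters
-- ===== SOURCE A (Python) =====
-- def cate_letters(LongStr):
--     lis2 = []
--     lis3 = []
--     lis4 = []
--     for x in LongStr:
--         if len(x) == 2:
--             lis2.append(x)
--         elif len(x) == 3:
--             lis3.append(x)
--         elif len(x) == 4:
--             lis4.append(x)
--     return lis2, lis3, lis4
-- ===== SOURCE B (Python) =====
-- def cate_letters(LongStr):
--     return ([x for x in LongStr if len(x) == 2],
--             [x for x in LongStr if len(x) == 3],
--             [x for x in LongStr if len(x) == 4])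
-- ===== Notes on version B (the rewrite author's own statement) =====
-- stated objective: idiomatic
-- what changed: The single accumulator loop with an if/elif chain is replaced by three independent list comprehensions, each filtering by one length.
import Mathlib
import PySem

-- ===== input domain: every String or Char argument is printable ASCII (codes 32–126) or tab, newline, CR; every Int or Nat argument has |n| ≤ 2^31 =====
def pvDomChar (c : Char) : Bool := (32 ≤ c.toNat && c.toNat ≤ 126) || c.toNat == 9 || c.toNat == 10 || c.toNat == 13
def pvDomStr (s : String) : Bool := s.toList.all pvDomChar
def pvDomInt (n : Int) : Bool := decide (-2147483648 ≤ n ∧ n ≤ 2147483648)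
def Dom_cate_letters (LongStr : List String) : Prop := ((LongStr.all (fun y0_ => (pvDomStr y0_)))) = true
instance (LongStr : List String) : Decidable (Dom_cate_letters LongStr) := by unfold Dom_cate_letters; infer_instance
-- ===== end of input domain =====

-- B replaces the single branching pass over LongStr with three independent filters (idiomatic decomposition; same O(n) cost).

-- ===== PORT A =====
-- A: one pass, three accumulators, appended at the tail via an if/elif chain (loop body = cateStep).
def cateStep (acc : List String × List String × List String) (x : String) :
    List String × List String × List String :=
  let (lis2, lis3, lis4) := acc
  if (PySem.Str.len x) = 2 then (lis2 ++ [x], lis3, lis4)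
  else if (PySem.Str.len x) = 3 then (lis2, lis3 ++ [x], lis4)
  else if (PySem.Str.len x) = 4 then (lis2, lis3, lis4 ++ [x])
  else (lis2, lis3, lis4)

def cate_letters (LongStr : List String) : List String × List String × List String :=
  LongStr.foldl cateStep ([], [], [])

-- ===== PORT B =====
-- B: three independent list comprehensions (filters).
def cate_letters_alt (LongStr : List String) : List String × List String × List String :=
  (LongStr.filter (fun x => (PySem.Str.len x) = 2),
   LongStr.filter (fun x => (PySem.Str.len x) = 3),
   LongStr.filter (fun x => (PySem.Str.len x) = 4))

-- ===== PRECONDITION & SPEC =====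
def Spec_cate_letters (LongStr : List String) (out : List String × List String × List String) : Prop := out = cate_letters_alt LongStr
instance (LongStr : List String) (out : List String × List String × List String) : Decidable (Spec_cate_letters LongStr out) := by unfold Spec_cate_letters; infer_instance

-- ===== CLAIM (what is proved, stated in full; the proofs are below) =====
def Claim_equal_cate_letters : Prop := ∀ (LongStr : List String), Dom_cate_letters LongStr → Spec_cate_letters LongStr (cate_letters LongStr)

-- ===== LEMMAS AND PROOFS =====

-- Loop invariant: the fold starting from any accumulator appends the three filters.
lemma cate_letters_foldl_inv (LongStr : List String) (a b c : List String) :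
    LongStr.foldl cateStep (a, b, c)
    = (a ++ LongStr.filter (fun x => (PySem.Str.len x) = 2),
       b ++ LongStr.filter (fun x => (PySem.Str.len x) = 3),
       c ++ LongStr.filter (fun x => (PySem.Str.len x) = 4)) := by
  induction LongStr generalizing a b c with
  | nil => simp
  | cons x xs ih =>
    simp only [List.foldl_cons, List.filter_cons]
    by_cases h2 : (PySem.Str.len x) = 2
    · simp [cateStep, PySem.Str.len, ih, show ((x.length : Int) = 2) from h2]
    · by_cases h3 : (PySem.Str.len x) = 3
      · simp [cateStep, PySem.Str.len, ih, show ¬((x.length : Int) = 2) from h2,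
          show ((x.length : Int) = 3) from h3]
      · by_cases h4 : (PySem.Str.len x) = 4
        · simp [cateStep, PySem.Str.len, ih, show ¬((x.length : Int) = 2) from h2,
            show ¬((x.length : Int) = 3) from h3, show ((x.length : Int) = 4) from h4]
        · simp [cateStep, PySem.Str.len, ih, show ¬((x.length : Int) = 2) from h2,
            show ¬((x.length : Int) = 3) from h3, show ¬((x.length : Int) = 4) from h4]

-- ===== VERDICT (by name: the statement is the Claim_ definition above) =====
theorem cate_letters_spec : Claim_equal_cate_letters := by
  intro LongStr _
  unfold Spec_cate_letters cate_letters cate_letters_alt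
  simpa using cate_letters_foldl_inv LongStr [] [] []
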